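-- pv_equiv track=rewrite | github.com/k-harada/AtCoder | nikkei2019-2-qual/C.py | solve
-- ===== SOURCE A (Python) =====
-- def solve(n, a_list, b_list):
--     a_list_s = sorted(a_list)
--     b_list_s = sorted(b_list)
--
--     # check 1
--     for i in range(n):
--         if a_list_s[i] > b_list_s[i]:
--             return "No"
--
--     # check 2
--     for i in range(n - 1):
--         if a_list_s[i + 1] <= b_list_s[i]:
--             return "Yes"
--
--     # check 3
--     # do it
--     # arg sort
--     a_list_s_arg = dict()
--     b_list_s_org = dict()
--     res_list = [0] * n
--     for j in range(n):
--         a_list_s_arg[a_list_s[j]] = j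
--     for k in range(n):
--         b_list_s_org[b_list[k]] = k
--     for i in range(n):
--         j = a_list_s_arg[a_list[i]]
--         k = b_list_s_org[b_list_s[j]]
--         res_list[i] = k
--
--     i = 0
--     cnt = 0
--     while True:
--         i = res_list[i]
--         cnt += 1
--         if i == 0:
--             break
--     if cnt == n:
--         return "No"
--     else:
--         return "Yes"
-- ===== SOURCE B (Python) =====
-- def solve(n, a_list, b_list):
--     a_s = sorted(a_list)
--     b_s = sorted(b_list)
--     if any(a_s[i] > b_s[i] for i in range(n)):
--         return "No"
--     if any(a_s[i + 1] <= b_s[i] for i in range(n - 1)):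
--         return "Yes"
--     # past the two checks all values are distinct (a_s[i] <= b_s[i] < a_s[i+1]),
--     # so the value->rank maps are honest bijections
--     rank_a = {x: j for j, x in enumerate(a_s)}
--     pos_b = {y: k for k, y in enumerate(b_list)}
--     perm = [pos_b[b_s[rank_a[x]]] for x in a_list]
--     # count ALL cycles of the permutation with a visited array;
--     # the matching is forced, and it needs at least one swap per cycle:
--     # impossible to mismatch everything only when there is a single cycle
--     visited = [False] * n
--     cycles = 0
--     for i in range(n):
--         if not visited[i]:
--             cycles += 1
--             j = i
--             while not visited[j]:
--                 visited[j] = True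
--                 j = perm[j]
--     return "No" if cycles == 1 else "Yes"
-- ===== Notes on version B (the rewrite author's own statement) =====
-- stated objective: alternative
-- what changed: The rank maps are built by dict comprehensions over enumerate and the permutation by a list comprehension instead of three index loops, and the final single-cycle walk from index 0 with a step counter is replaced by a full cycle count over a visited array (answer 'No' iff the permutation has exactly one cycle, equivalent to A's cnt==n test).
-- outside the precondition, e.g. on solve(1, [-1, 0, 28, -1, 10], [2, 10, 9, 4]): A returns 'No', B raises IndexError; on solve(1, [-707, -3, 2, 7, 173, 1000000007], [8, 8, 8]): A returns 'No', B raises IndexError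
import Mathlib
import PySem

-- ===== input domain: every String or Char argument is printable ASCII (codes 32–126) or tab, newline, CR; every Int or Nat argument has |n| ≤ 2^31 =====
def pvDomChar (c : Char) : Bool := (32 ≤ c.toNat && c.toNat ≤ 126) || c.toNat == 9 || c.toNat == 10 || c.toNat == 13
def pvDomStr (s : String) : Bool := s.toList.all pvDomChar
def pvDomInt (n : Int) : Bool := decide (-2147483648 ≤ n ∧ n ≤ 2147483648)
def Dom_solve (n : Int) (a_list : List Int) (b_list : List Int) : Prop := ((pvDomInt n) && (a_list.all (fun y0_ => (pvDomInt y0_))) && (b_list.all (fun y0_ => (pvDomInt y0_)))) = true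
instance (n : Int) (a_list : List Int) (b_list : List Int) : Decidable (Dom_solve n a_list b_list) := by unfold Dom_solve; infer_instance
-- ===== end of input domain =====

-- B keeps A's two early checks but builds the rank maps by comprehension over enumerate, builds the
-- permutation as a map instead of three index loops, and replaces A's single walk from index 0 with a
-- full cycle count over a visited array ("No" iff exactly one cycle); objective: alternative, not faster.

-- ===== PORT A =====
-- a 'for i in range(...): if P(i): return <val>' loop: scan upward for the first triggering index
def solveA_scan (P : Int → Bool) (i n : Int) : Bool :=
  if h : i < n then (if P i then true else solveA_scan P (i + 1) n) else false
termination_by (n - i).toNat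
decreasing_by omega

-- the 'while True: i = res_list[i]; cnt += 1; if i == 0: break' walk (fuel-bounded; fuel n+1 suffices
-- on Pre_, where res_list is a permutation)
def solveA_walk (res_list : List Int) : Nat → Int → Int → Int
  | 0, _, cnt => cnt
  | fuel + 1, i, cnt =>
    let i' := PySem.List.pyGetD res_list i 0
    if i' = 0 then cnt + 1 else solveA_walk res_list fuel i' (cnt + 1)

def solve (n : Int) (a_list : List Int) (b_list : List Int) : String :=
  let a_list_s := PySem.List.sorted a_list (fun x => x) false
  let b_list_s := PySem.List.sorted b_list (fun x => x) false
  -- check 1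
  if solveA_scan (fun i => decide (PySem.List.pyGetD a_list_s i 0 > PySem.List.pyGetD b_list_s i 0))
      0 n then "No"
  -- check 2
  else if solveA_scan (fun i => decide (PySem.List.pyGetD a_list_s (i + 1) 0 ≤ PySem.List.pyGetD b_list_s i 0))
      0 (n - 1) then "Yes"
  else
    -- check 3: arg sort dictionaries, res_list, then the walk
    let a_list_s_arg := (PySem.List.pyRange 0 n 1).foldl
      (fun d j => d.insert (PySem.List.pyGetD a_list_s j 0) j) (PySem.Dict.empty : PySem.Dict Int Int)
    let b_list_s_org := (PySem.List.pyRange 0 n 1).foldl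
      (fun d k => d.insert (PySem.List.pyGetD b_list k 0) k) (PySem.Dict.empty : PySem.Dict Int Int)
    let res_list := (PySem.List.pyRange 0 n 1).foldl
      (fun r i =>
        let j := a_list_s_arg.getD (PySem.List.pyGetD a_list i 0) 0
        let k := b_list_s_org.getD (PySem.List.pyGetD b_list_s j 0) 0
        PySem.List.pySetD r i k)
      (PySem.List.pyRepeat [0] n)
    let cnt := solveA_walk res_list (n.toNat + 1) 0 0
    if cnt = n then "No" else "Yes"

-- ===== PORT B =====
-- the inner 'while not visited[j]: visited[j] = True; j = perm[j]' marking walk (fuel-bounded;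
-- fuel n+1 suffices: each step marks one more index)
-- lazy 'any(P(i) for i in range(...))'
def solveB_any (Q : Int → Bool) (i n : Int) : Bool :=
  if h : n ≤ i then false else Q i || solveB_any Q (i + 1) n
termination_by (n - i).toNat
decreasing_by omega

def solveB_mark (perm : List Int) : Nat → List Bool → Int → List Bool
  | 0, vis, _ => vis
  | fuel + 1, vis, j =>
    if PySem.List.pyGetD vis j false = false then
      solveB_mark perm fuel (PySem.List.pySetD vis j true) (PySem.List.pyGetD perm j 0)
    else vis

def solve_alt (n : Int) (a_list : List Int) (b_list : List Int) : String :=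
  let a_s := PySem.List.sorted a_list (fun x => x) false
  let b_s := PySem.List.sorted b_list (fun x => x) false
  if solveB_any
      (fun i => decide (PySem.List.pyGetD a_s i 0 > PySem.List.pyGetD b_s i 0)) 0 n then "No"
  else if solveB_any
      (fun i => decide (PySem.List.pyGetD a_s (i + 1) 0 ≤ PySem.List.pyGetD b_s i 0)) 0 (n - 1) then "Yes"
  else
    let rank_a := (PySem.List.enumerate a_s 0).foldl
      (fun d p => d.insert p.2 p.1) (PySem.Dict.empty : PySem.Dict Int Int)
    let pos_b := (PySem.List.enumerate b_list 0).foldl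
      (fun d p => d.insert p.2 p.1) (PySem.Dict.empty : PySem.Dict Int Int)
    let perm := a_list.map
      (fun x => pos_b.getD (PySem.List.pyGetD b_s (rank_a.getD x 0) 0) 0)
    let st := (PySem.List.pyRange 0 n 1).foldl
      (fun (st : List Bool × Int) i =>
        if PySem.List.pyGetD st.1 i false = false then
          (solveB_mark perm (n.toNat + 1) st.1 i, st.2 + 1)
        else st)
      (PySem.List.pyRepeat [false] n, 0)
    if st.2 = 1 then "No" else "Yes"

-- ===== PRECONDITION & SPEC =====
-- Pre_ excludes the malformed inputs where n is not the length of both lists (there A raises, diverges,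
-- or — when it happens to return — the value is an accident of indexing only a prefix, and B itself
-- raises), and n = 0 (A raises IndexError); it keeps every shorter input on which A's early checks fire.
def Pre_solve (n : Int) (a_list : List Int) (b_list : List Int) : Prop :=
  (∃ i < a_list.length, (i : Int) < n ∧ i < b_list.length ∧
      PySem.List.pyGetD (PySem.List.sorted a_list (fun x => x) false) i 0 >
        PySem.List.pyGetD (PySem.List.sorted b_list (fun x => x) false) i 0) ∨
  (n ≤ a_list.length ∧ n ≤ b_list.length ∧
      ∃ i < a_list.length, (i : Int) < n - 1 ∧
        PySem.List.pyGetD (PySem.List.sorted a_list (fun x => x) false) ((i : Int) + 1) 0 ≤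
          PySem.List.pyGetD (PySem.List.sorted b_list (fun x => x) false) i 0) ∨
  (n = a_list.length ∧ n = b_list.length ∧ 1 ≤ n)

instance (n : Int) (a_list : List Int) (b_list : List Int) : Decidable (Pre_solve n a_list b_list) := by
  unfold Pre_solve; infer_instance

def pvWitness_solve : Int × List Int × List Int := (2, [1, 3], [2, 4])

def Spec_solve (n : Int) (a_list : List Int) (b_list : List Int) (out : String) : Prop := out = solve_alt n a_list b_list
instance (n : Int) (a_list : List Int) (b_list : List Int) (out : String) : Decidable (Spec_solve n a_list b_list out) := by unfold Spec_solve; infer_instance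

-- ===== CLAIM (what is proved, stated in full; the proofs are below) =====
def Claim_equal_solve : Prop := ∀ (n : Int) (a_list : List Int) (b_list : List Int), Dom_solve n a_list b_list → Pre_solve n a_list b_list → Spec_solve n a_list b_list (solve n a_list b_list)

-- ===== LEMMAS AND PROOFS =====

theorem solveA_scan_eq_any (P : Int → Bool) (i n : Int) :
    solveA_scan P i n = (PySem.List.pyRange i n 1).any P := by
  generalize hk : (n - i).toNat = k
  induction k generalizing i with
  | zero =>
    rw [solveA_scan, dif_neg (by omega), PySem.List.pyRange_one_eq_nil (by omega)]
    rfl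
  | succ k ih =>
    have h : i < n := by omega
    rw [solveA_scan, dif_pos h, PySem.List.pyRange_one_cons h, List.any_cons]
    rw [ih (i + 1) (by omega)]
    by_cases hp : P i <;> simp [hp]

theorem solveB_any_eq_any (Q : Int → Bool) (i n : Int) :
    solveB_any Q i n = (PySem.List.pyRange i n 1).any Q := by
  generalize hk : (n - i).toNat = k
  induction k generalizing i with
  | zero =>
    rw [solveB_any, dif_pos (by omega), PySem.List.pyRange_one_eq_nil (by omega)]
    rfl
  | succ k ih =>
    have h : i < n := by omega
    rw [solveB_any, dif_neg (by omega), PySem.List.pyRange_one_cons h, List.any_cons]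
    rw [ih (i + 1) (by omega)]

-- the two value→index dictionaries are built identically (index loop over range vs enumerate)
theorem dict_build_eq (xs : List Int) (e : PySem.Dict Int Int) :
    (PySem.List.pyRange 0 (xs.length : Int) 1).foldl
      (fun d j => d.insert (PySem.List.pyGetD xs j 0) j) e
    = (PySem.List.enumerate xs 0).foldl (fun d p => d.insert p.2 p.1) e := by
  rw [PySem.List.enumerate_eq_map_pyRange (d := 0), List.foldl_map]
  simp [PySem.List.len]

-- lookup in a value→index dictionary over a duplicate-free list
theorem rank_getD (xs : List Int) (hnd : xs.Nodup) (k : Nat) (hk : k < xs.length) :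
    ((PySem.List.enumerate xs 0).foldl (fun d p => d.insert p.2 p.1)
        (PySem.Dict.empty : PySem.Dict Int Int)).getD (xs.getD k 0) 0 = (k : Int) := by
  have hfresh := PySem.Dict.items_foldl_insert_fresh (PySem.List.enumerate xs 0)
      (fun p => p.2) (fun p => p.1) PySem.Dict.empty
      (by intro a _; simp)
      (by rw [PySem.List.map_snd_enumerate]; exact hnd)
  have hmem : ((xs.getD k 0), (k : Int)) ∈ ((PySem.List.enumerate xs 0).foldl
      (fun d p => d.insert p.2 p.1) (PySem.Dict.empty : PySem.Dict Int Int)).items := by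
    rw [hfresh]
    refine List.mem_append.mpr (Or.inr ?_)
    refine List.mem_map.mpr ⟨((k : Int), xs[k]), ?_, ?_⟩
    · rw [PySem.List.mem_enumerate_iff]; exact ⟨k, hk, by simp⟩
    · simp [List.getD, List.getElem?_eq_getElem hk]
  have hkeysnd := PySem.Dict.nodup_keys_foldl_insert_key (PySem.List.enumerate xs 0)
      (fun p => p.2) (fun _ p => p.1) PySem.Dict.empty (by simp)
  exact PySem.Dict.getD_of_mem_items _ hmem hkeysnd 0

-- writing slot i := g i for i in range(m) over a length-≥-m list is map g ++ leftover
theorem foldl_set_eq_map (g : Int → Int) : ∀ (m : Nat) (st : List Int), m ≤ st.length →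
    (PySem.List.pyRange 0 (m : Int) 1).foldl (fun r i => PySem.List.pySetD r i (g i)) st
    = ((PySem.List.pyRange 0 (m : Int) 1).map g) ++ st.drop m := by
  intro m
  induction m with
  | zero => intro st _; simp [PySem.List.pyRange_one_eq_nil]
  | succ m ih =>
    intro st hst
    have hcast : ((m + 1 : Nat) : Int) = (m : Int) + 1 := by push_cast; ring
    rw [hcast, PySem.List.pyRange_one_succ_right (by positivity)]
    rw [List.foldl_append, List.map_append, ih st (by omega)]
    simp only [List.foldl_cons, List.foldl_nil, List.map_cons, List.map_nil]
    rw [PySem.List.pySetD_natCast, List.set_append]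
    have hlenmap : ((PySem.List.pyRange 0 (m : Int) 1).map g).length = m := by
      simp [PySem.List.length_pyRange_one]
    rw [if_neg (by omega), hlenmap, Nat.sub_self]
    rw [List.drop_eq_getElem_cons (by omega), List.set_cons_zero]
    rw [List.append_assoc, List.singleton_append]

theorem foldl_fixed {α β : Type} (g : β → α → β) (s : β) :
    ∀ (l : List α), (∀ x ∈ l, g s x = s) → l.foldl g s = s := by
  intro l
  induction l with
  | nil => intro _; rfl
  | cons x t ih => intro h; rw [List.foldl_cons, h x (by simp), ih (fun y hy => h y (by simp [hy]))]

-- adjacent strict increase gives pairwise strict increase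
theorem pairwise_lt_of_adjacent (l : List Int)
    (h : ∀ k, k + 1 < l.length → l.getD k 0 < l.getD (k + 1) 0) : l.Pairwise (· < ·) := by
  have hc : l.IsChain (· < ·) := by
    rw [List.isChain_iff_getElem]
    intro i hi
    have := h i (by omega)
    rwa [List.getD_eq_getElem _ _ (by omega), List.getD_eq_getElem _ _ (by omega)] at this
  exact hc.pairwise

theorem orbit_lt (f : Nat → Nat) (m : Nat) (hm : 0 < m) (hf : ∀ i, i < m → f i < m) :
    ∀ t, f^[t] 0 < m := by
  intro t
  induction t with
  | zero => simpa using hm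
  | succ t ih => rw [Function.iterate_succ_apply']; exact hf _ ih

-- peeling an injective map off a repeated orbit value
theorem iterate_peel (f : Nat → Nat) (m : Nat) (hm : 0 < m)
    (hf : ∀ i, i < m → f i < m)
    (hinj : ∀ i, i < m → ∀ j, j < m → f i = f j → i = j) :
    ∀ s u, f^[s] 0 = f^[s + u] 0 → f^[u] 0 = 0 := by
  intro s
  induction s with
  | zero => intro u h; simpa using h.symm
  | succ s ih =>
    intro u h
    apply ih
    have h1 : f (f^[s] 0) = f (f^[s + u] 0) := by
      have hsu : s + 1 + u = s + u + 1 := by omega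
      rw [hsu] at h
      rw [Function.iterate_succ_apply', Function.iterate_succ_apply'] at h
      exact h
    exact hinj _ (orbit_lt f m hm hf s) _ (orbit_lt f m hm hf (s + u)) h1


theorem orbit_exists_return (f : Nat → Nat) (m : Nat) (hm : 0 < m)
    (hf : ∀ i, i < m → f i < m)
    (hinj : ∀ i, i < m → ∀ j, j < m → f i = f j → i = j) :
    ∃ t, 0 < t ∧ t ≤ m ∧ f^[t] 0 = 0 := by
  obtain ⟨x, hx, y, hy, hne, heq⟩ := Finset.exists_ne_map_eq_of_card_lt_of_maps_to
    (s := Finset.range (m + 1)) (t := Finset.range m) (by simp)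
    (fun t _ => Finset.mem_range.mpr (orbit_lt f m hm hf t))
  simp only [Finset.mem_range] at hx hy
  rcases Nat.lt_or_ge x y with hlt | hge
  · refine ⟨y - x, by omega, by omega, ?_⟩
    apply iterate_peel f m hm hf hinj x (y - x)
    have hxy : x + (y - x) = y := by omega
    rw [hxy]; exact heq
  · have hlt2 : y < x := by omega
    refine ⟨x - y, by omega, by omega, ?_⟩
    apply iterate_peel f m hm hf hinj y (x - y)
    have hxy : y + (x - y) = x := by omega
    rw [hxy]; exact heq.symm


-- the Nat successor function read off the permutation list
def pstep (p : List Int) (i : Nat) : Nat := (p.getD i 0).toNat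

theorem pyGetD_pstep (p : List Int) (m : Nat)
    (hran : ∀ k, k < m → 0 ≤ p.getD k 0 ∧ p.getD k 0 < (m : Int)) (x : Nat) (hx : x < m) :
    PySem.List.pyGetD p ((x : Nat) : Int) 0 = ((pstep p x : Nat) : Int) := by
  rw [PySem.List.pyGetD_natCast]
  have h := (hran x hx).1
  simp only [pstep]
  omega

theorem pstep_lt (p : List Int) (m : Nat)
    (hran : ∀ k, k < m → 0 ≤ p.getD k 0 ∧ p.getD k 0 < (m : Int)) (x : Nat) (hx : x < m) :
    pstep p x < m := by
  have := hran x hx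
  simp only [pstep]
  omega

theorem pstep_inj (p : List Int) (m : Nat)
    (hran : ∀ k, k < m → 0 ≤ p.getD k 0 ∧ p.getD k 0 < (m : Int))
    (hinj : ∀ k, k < m → ∀ k', k' < m → p.getD k 0 = p.getD k' 0 → k = k') :
    ∀ i, i < m → ∀ j, j < m → pstep p i = pstep p j → i = j := by
  intro i hi j hj h
  apply hinj i hi j hj
  have h1 := (hran i hi).1
  have h2 := (hran j hj).1
  simp only [pstep] at h
  omega

-- A's fuelled walk returns the first return time t0
theorem walkA_val (p : List Int) (m : Nat) (hm : 0 < m)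
    (hran : ∀ k, k < m → 0 ≤ p.getD k 0 ∧ p.getD k 0 < (m : Int)) (t0 : Nat)
    (ht0pos : 0 < t0) (ht0ret : (pstep p)^[t0] 0 = 0)
    (ht0min : ∀ s, 0 < s → s < t0 → (pstep p)^[s] 0 ≠ 0) :
    ∀ (fuel t : Nat), t < t0 → t0 ≤ t + fuel →
      solveA_walk p fuel (((pstep p)^[t] 0 : Nat) : Int) (t : Int) = (t0 : Int) := by
  intro fuel
  induction fuel with
  | zero => intro t h1 h2; omega
  | succ fuel ih =>
    intro t h1 h2
    have horb := orbit_lt (pstep p) m hm (pstep_lt p m hran)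
    have hb : PySem.List.pyGetD p (((pstep p)^[t] 0 : Nat) : Int) 0
        = (((pstep p)^[t+1] 0 : Nat) : Int) := by
      rw [pyGetD_pstep p m hran _ (horb t), Function.iterate_succ_apply']
    rw [solveA_walk, hb]
    by_cases h0 : (pstep p)^[t+1] 0 = 0
    · have ht0 : t0 = t + 1 := by
        by_contra hne
        exact ht0min (t+1) (by omega) (by omega) h0
      rw [if_pos (by exact_mod_cast congrArg (Nat.cast (R := Int)) h0)]
      push_cast [ht0]; ring
    · rw [if_neg (by exact_mod_cast h0)]
      have ht1 : t + 1 < t0 := by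
        rcases Nat.lt_or_ge (t+1) t0 with h | h
        · exact h
        · have ht : t0 = t + 1 := by omega
          exact absurd (ht ▸ ht0ret) h0
      have := ih (t + 1) ht1 (by omega)
      push_cast at this ⊢
      exact this

-- the visited array after the first t steps of the walk from 0
def visAt (f : Nat → Nat) (m t : Nat) : List Bool :=
  (List.range m).map (fun x => decide (∃ s, s < t ∧ f^[s] 0 = x))

theorem visAt_zero (f : Nat → Nat) (m : Nat) : visAt f m 0 = List.replicate m false := by
  apply List.ext_getElem
  · simp [visAt]
  · intro i h1 h2
    simp [visAt]

theorem visAt_get (f : Nat → Nat) (m t : Nat) (x : Nat) (hx : x < m) :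
    PySem.List.pyGetD (visAt f m t) ((x : Nat) : Int) false
      = decide (∃ s, s < t ∧ f^[s] 0 = x) := by
  rw [PySem.List.pyGetD_natCast]
  unfold visAt
  rw [List.getD_eq_getElem _ _ (by simpa using hx)]
  simp

theorem visAt_set (f : Nat → Nat) (m t : Nat) (horb : ∀ s, f^[s] 0 < m) :
    PySem.List.pySetD (visAt f m t) ((f^[t] 0 : Nat) : Int) true = visAt f m (t + 1) := by
  rw [PySem.List.pySetD_natCast]
  apply List.ext_getElem
  · simp [visAt]
  · intro i h1 h2
    have him : i < m := by simpa [visAt] using h2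
    rw [List.getElem_set]
    by_cases hieq : f^[t] 0 = i
    · rw [if_pos hieq]
      simp only [visAt, List.getElem_map, List.getElem_range]
      exact (decide_eq_true ⟨t, by omega, hieq⟩).symm
    · rw [if_neg hieq]
      simp only [visAt, List.getElem_map, List.getElem_range]
      apply decide_eq_decide.mpr
      constructor
      · rintro ⟨s, hs, hfs⟩; exact ⟨s, by omega, hfs⟩
      · rintro ⟨s, hs, hfs⟩
        refine ⟨s, ?_, hfs⟩
        rcases Nat.lt_or_ge s t with h | h
        · exact h
        · have hst : s = t := by omega
          exact absurd (hst ▸ hfs) hieq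

-- B's fuelled marking walk marks exactly the orbit of 0
theorem markB_val (p : List Int) (m : Nat) (hm : 0 < m)
    (hran : ∀ k, k < m → 0 ≤ p.getD k 0 ∧ p.getD k 0 < (m : Int))
    (hinj : ∀ k, k < m → ∀ k', k' < m → p.getD k 0 = p.getD k' 0 → k = k') (t0 : Nat)
    (ht0pos : 0 < t0) (ht0ret : (pstep p)^[t0] 0 = 0)
    (ht0min : ∀ s, 0 < s → s < t0 → (pstep p)^[s] 0 ≠ 0) :
    ∀ (fuel t : Nat), t ≤ t0 → t0 + 1 ≤ t + fuel →
      solveB_mark p fuel (visAt (pstep p) m t) (((pstep p)^[t] 0 : Nat) : Int)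
        = visAt (pstep p) m t0 := by
  intro fuel
  induction fuel with
  | zero => intro t h1 h2; omega
  | succ fuel ih =>
    intro t h1 h2
    have horb := orbit_lt (pstep p) m hm (pstep_lt p m hran)
    rw [solveB_mark, visAt_get (pstep p) m t _ (horb t)]
    rcases Nat.lt_or_ge t t0 with hlt | hge
    · have hcond : ¬ ∃ s, s < t ∧ (pstep p)^[s] 0 = (pstep p)^[t] 0 := by
        rintro ⟨s, hs, hfs⟩
        have := iterate_peel (pstep p) m hm (pstep_lt p m hran)
          (pstep_inj p m hran hinj) s (t - s) (by
            have : s + (t - s) = t := by omega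
            rw [this]; exact hfs)
        exact ht0min (t - s) (by omega) (by omega) this
      rw [if_pos (by simp [hcond])]
      have hsucc : pstep p ((pstep p)^[t] 0) = (pstep p)^[t + 1] 0 :=
        (Function.iterate_succ_apply' _ _ _).symm
      rw [visAt_set (pstep p) m t horb, pyGetD_pstep p m hran _ (horb t), hsucc]
      exact ih (t + 1) (by omega) (by omega)
    · have ht : t = t0 := by omega
      subst ht
      have hcond : ∃ s, s < t ∧ (pstep p)^[s] 0 = (pstep p)^[t] 0 := by
        exact ⟨0, by omega, by simp [ht0ret]⟩
      rw [if_neg (by simp [hcond])]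

-- the cycle counter never decreases along B's outer loop
theorem foldl_snd_mono (p : List Int) (fuel : Nat) :
    ∀ (l : List Int) (st : List Bool × Int),
      st.2 ≤ (l.foldl (fun (st : List Bool × Int) i =>
        if PySem.List.pyGetD st.1 i false = false then
          (solveB_mark p fuel st.1 i, st.2 + 1)
        else st) st).2 := by
  intro l
  induction l with
  | nil => intro st; exact le_refl _
  | cons x t ih =>
    intro st
    rw [List.foldl_cons]
    refine le_trans ?_ (ih _)
    split_ifs <;> simp

-- the heart: A's walk count equals m iff B's visited-array cycle count equals 1
theorem AB_cycle_iff (p : List Int) (m : Nat) (hm : 0 < m) (hlen : p.length = m)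
    (hran : ∀ k, k < m → 0 ≤ p.getD k 0 ∧ p.getD k 0 < (m : Int))
    (hinj : ∀ k, k < m → ∀ k', k' < m → p.getD k 0 = p.getD k' 0 → k = k') :
    (solveA_walk p (m + 1) 0 0 = (m : Int) ↔
      ((PySem.List.pyRange 0 (m : Int) 1).foldl
        (fun (st : List Bool × Int) i =>
          if PySem.List.pyGetD st.1 i false = false then
            (solveB_mark p (m + 1) st.1 i, st.2 + 1)
          else st)
        (List.replicate m false, 0)).2 = 1) := by
  have hf := pstep_lt p m hran
  have hfinj := pstep_inj p m hran hinj
  have horb := orbit_lt (pstep p) m hm hf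
  have hex : ∃ t, 0 < t ∧ (pstep p)^[t] 0 = 0 := by
    obtain ⟨t, h1, _, h3⟩ := orbit_exists_return (pstep p) m hm hf hfinj
    exact ⟨t, h1, h3⟩
  set t0 := Nat.find hex with ht0def
  have ht0spec := Nat.find_spec hex
  have ht0pos : 0 < t0 := ht0spec.1
  have ht0ret : (pstep p)^[t0] 0 = 0 := ht0spec.2
  have ht0min : ∀ s, 0 < s → s < t0 → (pstep p)^[s] 0 ≠ 0 := by
    intro s hs hst hret
    exact Nat.find_min hex hst ⟨hs, hret⟩
  have ht0le : t0 ≤ m := by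
    obtain ⟨t, h1, h2, h3⟩ := orbit_exists_return (pstep p) m hm hf hfinj
    exact le_trans (Nat.find_le ⟨h1, h3⟩) h2
  have hA : solveA_walk p (m + 1) 0 0 = (t0 : Int) := by
    have := walkA_val p m hm hran t0 ht0pos ht0ret ht0min (m + 1) 0 ht0pos (by omega)
    simpa using this
  have hOinj : ∀ s, s < t0 → ∀ t, t < t0 → (pstep p)^[s] 0 = (pstep p)^[t] 0 → s = t := by
    intro s hs t ht h
    by_contra hne
    rcases Nat.lt_or_ge s t with hlt | hge
    · exact ht0min (t - s) (by omega) (by omega)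
        (iterate_peel (pstep p) m hm hf hfinj s (t - s) (by
          have hst : s + (t - s) = t := by omega
          rw [hst]; exact h))
    · exact ht0min (s - t) (by omega) (by omega)
        (iterate_peel (pstep p) m hm hf hfinj t (s - t) (by
          have hst : t + (s - t) = s := by omega
          rw [hst]; exact h.symm))
  have hnodup : ((List.range t0).map (fun t => (pstep p)^[t] 0)).Nodup := by
    apply List.Nodup.map_on ?_ List.nodup_range
    intro s hs t ht h
    exact hOinj s (List.mem_range.mp hs) t (List.mem_range.mp ht) h
  have hsub : ((List.range t0).map (fun t => (pstep p)^[t] 0)).toFinset ⊆ Finset.range m := by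
    intro x hx
    simp only [List.mem_toFinset, List.mem_map, List.mem_range] at hx
    obtain ⟨t, _, h⟩ := hx
    exact Finset.mem_range.mpr (h ▸ horb t)
  have hcard : ((List.range t0).map (fun t => (pstep p)^[t] 0)).toFinset.card = t0 := by
    rw [List.toFinset_card_of_nodup hnodup]
    simp
  have hcover : t0 = m → ∀ x, x < m → ∃ s, s < t0 ∧ (pstep p)^[s] 0 = x := by
    intro hEq x hx
    have hfeq := Finset.eq_of_subset_of_card_le hsub (by rw [hcard, hEq, Finset.card_range])
    have hxmem : x ∈ ((List.range t0).map (fun t => (pstep p)^[t] 0)).toFinset := by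
      rw [hfeq]; exact Finset.mem_range.mpr hx
    simp only [List.mem_toFinset, List.mem_map, List.mem_range] at hxmem
    obtain ⟨s, hs, h⟩ := hxmem
    exact ⟨s, hs, h⟩
  have hmiss : t0 < m → ∃ x, x < m ∧ ¬ ∃ s, s < t0 ∧ (pstep p)^[s] 0 = x := by
    intro hltm
    by_contra hforall
    have hforall' : ∀ x, x < m → ∃ s, s < t0 ∧ (pstep p)^[s] 0 = x := by
      intro x hx
      by_contra hc
      exact hforall ⟨x, hx, hc⟩
    have hss : Finset.range m ⊆ ((List.range t0).map (fun t => (pstep p)^[t] 0)).toFinset := by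
      intro x hx
      obtain ⟨s, hs, h⟩ := hforall' x (Finset.mem_range.mp hx)
      simp only [List.mem_toFinset, List.mem_map, List.mem_range]
      exact ⟨s, hs, h⟩
    have hle := Finset.card_le_card hss
    rw [hcard, Finset.card_range] at hle
    omega
  have hmark0 : solveB_mark p (m + 1) (List.replicate m false) 0 = visAt (pstep p) m t0 := by
    have := markB_val p m hm hran hinj t0 ht0pos ht0ret ht0min (m + 1) 0 (by omega) (by omega)
    simpa [visAt_zero] using this
  set step := fun (st : List Bool × Int) (i : Int) =>
    if PySem.List.pyGetD st.1 i false = false then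
      (solveB_mark p (m + 1) st.1 i, st.2 + 1)
    else st with hstepdef
  have hvget0 : PySem.List.pyGetD (List.replicate m false) (0 : Int) false = false := by
    rw [show ((0 : Int)) = ((0 : Nat) : Int) by simp, PySem.List.pyGetD_natCast]
    rw [List.getD_eq_getElem _ _ (by simpa using hm)]
    simp
  have hfold1 : (PySem.List.pyRange 0 (m : Int) 1).foldl step (List.replicate m false, 0)
      = (PySem.List.pyRange 1 (m : Int) 1).foldl step (visAt (pstep p) m t0, 1) := by
    rw [PySem.List.pyRange_one_cons (by exact_mod_cast hm), List.foldl_cons]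
    have hstep00 : step (List.replicate m false, 0) 0 = (visAt (pstep p) m t0, 1) := by
      rw [hstepdef]
      simp only []
      rw [if_pos hvget0, hmark0]
      norm_num
    rw [hstep00]
    norm_num
  rcases eq_or_lt_of_le ht0le with hEq | hltm
  · -- t0 = m : the orbit of 0 covers everything, B counts a single cycle
    have hall := hcover hEq
    have hfix : (PySem.List.pyRange 1 (m : Int) 1).foldl step (visAt (pstep p) m t0, 1)
        = (visAt (pstep p) m t0, 1) := by
      apply foldl_fixed
      intro x hxmem
      obtain ⟨hx1, hx2⟩ := PySem.List.mem_pyRange_one.mp hxmem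
      have hxm : x.toNat < m := by omega
      have hxcast : x = ((x.toNat : Nat) : Int) := by omega
      have hvis := hall x.toNat hxm
      rw [hstepdef]
      simp only []
      rw [hxcast, visAt_get (pstep p) m t0 _ hxm]
      rw [if_neg (by simp [hvis])]
    constructor
    · intro _
      rw [hfold1, hfix]
    · intro _
      rw [hA]
      exact_mod_cast congrArg (Nat.cast (R := Int)) hEq
  · -- t0 < m : a second cycle starts at the least unvisited index, B counts at least 2
    have hexx := hmiss hltm
    set i0 := Nat.find hexx with hi0def
    have hi0 := Nat.find_spec hexx
    rw [← hi0def] at hi0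
    have hi0min : ∀ y, y < i0 → y < m → ∃ s, s < t0 ∧ (pstep p)^[s] 0 = y := by
      intro y hy hym
      by_contra hc
      exact Nat.find_min hexx hy ⟨hym, hc⟩
    have hi0pos : 0 < i0 := by
      rcases Nat.eq_zero_or_pos i0 with h0 | h
      · exact absurd ⟨0, ht0pos, by simp only [Function.iterate_zero_apply]; omega⟩ hi0.2
      · exact h
    have hsplit2 : PySem.List.pyRange 1 (m : Int) 1
        = PySem.List.pyRange 1 (i0 : Int) 1 ++ PySem.List.pyRange (i0 : Int) (m : Int) 1 :=
      PySem.List.pyRange_one_append 1 (i0 : Int) (m : Int)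
        (by exact_mod_cast hi0pos) (by exact_mod_cast le_of_lt hi0.1)
    have hfix2 : (PySem.List.pyRange 1 (i0 : Int) 1).foldl step (visAt (pstep p) m t0, 1)
        = (visAt (pstep p) m t0, 1) := by
      apply foldl_fixed
      intro x hxmem
      obtain ⟨hx1, hx2⟩ := PySem.List.mem_pyRange_one.mp hxmem
      have hxi0 : x.toNat < i0 := by omega
      have hxm : x.toNat < m := by omega
      have hxcast : x = ((x.toNat : Nat) : Int) := by omega
      have hvis := hi0min x.toNat hxi0 hxm
      rw [hstepdef]
      simp only []
      rw [hxcast, visAt_get (pstep p) m t0 _ hxm]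
      rw [if_neg (by simp [hvis])]
    have hge2 : 2 ≤ ((PySem.List.pyRange 0 (m : Int) 1).foldl step
        (List.replicate m false, 0)).2 := by
      rw [hfold1, hsplit2, List.foldl_append, hfix2]
      rw [PySem.List.pyRange_one_cons (by exact_mod_cast hi0.1), List.foldl_cons]
      have hstep0 : step (visAt (pstep p) m t0, 1) (i0 : Int)
          = (solveB_mark p (m + 1) (visAt (pstep p) m t0) (i0 : Int), 2) := by
        rw [hstepdef]
        simp only []
        rw [visAt_get (pstep p) m t0 _ hi0.1]
        rw [if_pos (by simp [hi0.2])]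
        norm_num
      rw [hstep0]
      have := foldl_snd_mono p (m + 1) (PySem.List.pyRange ((i0 : Int) + 1) (m : Int) 1)
        (solveB_mark p (m + 1) (visAt (pstep p) m t0) (i0 : Int), 2)
      exact this
    constructor
    · intro hAw
      rw [hA] at hAw
      have : t0 = m := by exact_mod_cast hAw
      omega
    · intro hBc
      rw [hBc] at hge2
      omega



theorem nodup_getD_inj (l : List Int) (hnd : l.Nodup) (i j : Nat)
    (hi : i < l.length) (hj : j < l.length) (h : l.getD i 0 = l.getD j 0) : i = j := by
  rw [List.getD_eq_getElem _ _ hi, List.getD_eq_getElem _ _ hj] at h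
  exact (List.Nodup.getElem_inj_iff hnd).mp h

theorem map_range_getD (a : List Int) (h : Int → Int) :
    (PySem.List.pyRange 0 (a.length : Int) 1).map (fun i => h (PySem.List.pyGetD a i 0))
      = a.map h := by
  conv_rhs => rw [← PySem.List.map_pyGetD_pyRange_zero' a 0]
  rw [List.map_map]
  rfl

-- ===== VERDICT (by name: the statement is the Claim_ definition above) =====
theorem solve_spec : Claim_equal_solve := by
  intro n a b hdom hpre
  unfold Spec_solve
  simp only [solve, solve_alt, solveA_scan_eq_any, solveB_any_eq_any]
  by_cases hc1 : ((PySem.List.pyRange 0 n 1).any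
      (fun i => decide (PySem.List.pyGetD (PySem.List.sorted a (fun x => x) false) i 0 >
        PySem.List.pyGetD (PySem.List.sorted b (fun x => x) false) i 0))) = true
  · simp only [hc1, if_true]
  · have hc1' : ((PySem.List.pyRange 0 n 1).any
        (fun i => decide (PySem.List.pyGetD (PySem.List.sorted a (fun x => x) false) i 0 >
          PySem.List.pyGetD (PySem.List.sorted b (fun x => x) false) i 0))) = false := by
      simpa using hc1
    simp only [hc1', Bool.false_eq_true, if_false]
    by_cases hc2 : ((PySem.List.pyRange 0 (n - 1) 1).any
        (fun i => decide (PySem.List.pyGetD (PySem.List.sorted a (fun x => x) false) (i + 1) 0 ≤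
          PySem.List.pyGetD (PySem.List.sorted b (fun x => x) false) i 0))) = true
    · simp only [hc2, if_true]
    · have hc2' : ((PySem.List.pyRange 0 (n - 1) 1).any
          (fun i => decide (PySem.List.pyGetD (PySem.List.sorted a (fun x => x) false) (i + 1) 0 ≤
            PySem.List.pyGetD (PySem.List.sorted b (fun x => x) false) i 0))) = false := by
        simpa using hc2
      simp only [hc2', Bool.false_eq_true, if_false]
      -- the two early checks failed: Pre_ forces n = |a| = |b| ≥ 1
      have hlen3 : n = (a.length : Int) ∧ n = (b.length : Int) ∧ 1 ≤ n := by
        rcases hpre with ⟨i, hia, hin, hib, hgt⟩ | ⟨hla, hlb, i, hia, hin, hle⟩ | h3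
        · exfalso
          have : ((PySem.List.pyRange 0 n 1).any
              (fun i => decide (PySem.List.pyGetD (PySem.List.sorted a (fun x => x) false) i 0 >
                PySem.List.pyGetD (PySem.List.sorted b (fun x => x) false) i 0))) = true := by
            rw [List.any_eq_true]
            exact ⟨(i : Int), PySem.List.mem_pyRange_one.mpr ⟨by positivity, hin⟩, by simpa using hgt⟩
          rw [this] at hc1'
          exact absurd hc1' (by simp)
        · exfalso
          have : ((PySem.List.pyRange 0 (n - 1) 1).any
              (fun i => decide (PySem.List.pyGetD (PySem.List.sorted a (fun x => x) false) (i + 1) 0 ≤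
                PySem.List.pyGetD (PySem.List.sorted b (fun x => x) false) i 0))) = true := by
            rw [List.any_eq_true]
            exact ⟨(i : Int), PySem.List.mem_pyRange_one.mpr ⟨by positivity, hin⟩, by simpa using hle⟩
          rw [this] at hc2'
          exact absurd hc2' (by simp)
        · exact h3
      obtain ⟨hna, hnb, hn1⟩ := hlen3
      have hm0 : 0 < a.length := by omega
      have hlb : b.length = a.length := by omega
      have hlas : (PySem.List.sorted a (fun x => x) false).length = a.length :=
        PySem.List.length_sorted a (fun x => x) false
      have hlbs : (PySem.List.sorted b (fun x => x) false).length = a.length := by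
        rw [PySem.List.length_sorted]; exact hlb
      -- pointwise consequences of the two failed checks
      have hle : ∀ k, k < a.length →
          (PySem.List.sorted a (fun x => x) false).getD k 0 ≤
            (PySem.List.sorted b (fun x => x) false).getD k 0 := by
        intro k hk
        have hmem : ((k : Nat) : Int) ∈ PySem.List.pyRange 0 n 1 :=
          PySem.List.mem_pyRange_one.mpr ⟨by positivity, by omega⟩
        have := List.any_eq_false.mp hc1' _ hmem
        simpa using this
      have hgtadj : ∀ k, k + 1 < a.length →
          (PySem.List.sorted b (fun x => x) false).getD k 0 <
            (PySem.List.sorted a (fun x => x) false).getD (k + 1) 0 := by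
        intro k hk
        have hmem : ((k : Nat) : Int) ∈ PySem.List.pyRange 0 (n - 1) 1 :=
          PySem.List.mem_pyRange_one.mpr ⟨by positivity, by omega⟩
        have h : ¬ ((decide (PySem.List.pyGetD (PySem.List.sorted a (fun x => x) false) (((k : Nat) : Int) + 1) 0 ≤
            PySem.List.pyGetD (PySem.List.sorted b (fun x => x) false) ((k : Nat) : Int) 0)) = true) :=
          List.any_eq_false.mp hc2' _ hmem
        have hcast : ((k : Nat) : Int) + 1 = ((k + 1 : Nat) : Int) := by push_cast; ring
        rw [hcast, PySem.List.pyGetD_natCast, PySem.List.pyGetD_natCast] at h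
        simp only [decide_eq_true_eq, not_le] at h
        exact h
      have haspw : (PySem.List.sorted a (fun x => x) false).Pairwise (· < ·) := by
        apply pairwise_lt_of_adjacent
        intro k hk
        rw [hlas] at hk
        exact lt_of_le_of_lt (hle k (by omega)) (hgtadj k hk)
      have hbspw : (PySem.List.sorted b (fun x => x) false).Pairwise (· < ·) := by
        apply pairwise_lt_of_adjacent
        intro k hk
        rw [hlbs] at hk
        exact lt_of_lt_of_le (hgtadj k hk) (hle (k + 1) hk)
      have hasnd : (PySem.List.sorted a (fun x => x) false).Nodup :=
        haspw.imp (fun h => ne_of_lt h)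
      have hbsnd : (PySem.List.sorted b (fun x => x) false).Nodup :=
        hbspw.imp (fun h => ne_of_lt h)
      have hand : a.Nodup := (PySem.List.sorted_perm a (fun x => x) false).nodup hasnd
      have hbnd : b.Nodup := (PySem.List.sorted_perm b (fun x => x) false).nodup hbsnd
      -- identify A's dictionaries with B's
      have hna' : n = ((PySem.List.sorted a (fun x => x) false).length : Int) := by
        rw [hlas]; exact hna
      have hda : (PySem.List.pyRange 0 n 1).foldl
          (fun d j => d.insert (PySem.List.pyGetD (PySem.List.sorted a (fun x => x) false) j 0) j)
          (PySem.Dict.empty : PySem.Dict Int Int)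
          = (PySem.List.enumerate (PySem.List.sorted a (fun x => x) false) 0).foldl
            (fun d p => d.insert p.2 p.1) (PySem.Dict.empty : PySem.Dict Int Int) := by
        rw [hna']; exact dict_build_eq _ _
      have hdb : (PySem.List.pyRange 0 n 1).foldl
          (fun d k => d.insert (PySem.List.pyGetD b k 0) k)
          (PySem.Dict.empty : PySem.Dict Int Int)
          = (PySem.List.enumerate b 0).foldl
            (fun d p => d.insert p.2 p.1) (PySem.Dict.empty : PySem.Dict Int Int) := by
        rw [hnb]; exact dict_build_eq _ _
      simp only [hda, hdb]
      -- rewrite n to the length and normalize fuel and initial arrays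
      simp only [hna, Int.toNat_natCast, PySem.List.pyRepeat_singleton]
      rw [foldl_set_eq_map _ a.length (List.replicate a.length 0) (by simp)]
      simp only [List.drop_replicate, Nat.sub_self, List.replicate_zero, List.append_nil]
      rw [map_range_getD a (fun x =>
        ((PySem.List.enumerate b 0).foldl (fun d p => d.insert p.2 p.1)
            (PySem.Dict.empty : PySem.Dict Int Int)).getD
          (PySem.List.pyGetD (PySem.List.sorted b (fun x => x) false)
            (((PySem.List.enumerate (PySem.List.sorted a (fun x => x) false) 0).foldl
                (fun d p => d.insert p.2 p.1) (PySem.Dict.empty : PySem.Dict Int Int)).getD x 0) 0) 0)]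
      set p := a.map (fun x =>
        ((PySem.List.enumerate b 0).foldl (fun d p => d.insert p.2 p.1)
            (PySem.Dict.empty : PySem.Dict Int Int)).getD
          (PySem.List.pyGetD (PySem.List.sorted b (fun x => x) false)
            (((PySem.List.enumerate (PySem.List.sorted a (fun x => x) false) 0).foldl
                (fun d p => d.insert p.2 p.1) (PySem.Dict.empty : PySem.Dict Int Int)).getD x 0) 0) 0)
        with hpdef
      have hplen : p.length = a.length := by rw [hpdef]; simp
      have hpval : ∀ k, k < a.length → ∃ j t, j < a.length ∧ t < a.length ∧
          (PySem.List.sorted a (fun x => x) false).getD j 0 = a.getD k 0 ∧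
          b.getD t 0 = (PySem.List.sorted b (fun x => x) false).getD j 0 ∧
          p.getD k 0 = (t : Int) := by
        intro k hk
        have hmema : a.getD k 0 ∈ PySem.List.sorted a (fun x => x) false := by
          rw [PySem.List.mem_sorted, List.getD_eq_getElem _ _ hk]
          exact List.getElem_mem _
        obtain ⟨j, hj, hjv⟩ := List.mem_iff_getElem.mp hmema
        have hj' : j < a.length := by rw [← hlas]; exact hj
        have hjv' : (PySem.List.sorted a (fun x => x) false).getD j 0 = a.getD k 0 := by
          rw [List.getD_eq_getElem _ _ hj]; exact hjv
        have hmemb : (PySem.List.sorted b (fun x => x) false).getD j 0 ∈ b := by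
          rw [List.getD_eq_getElem _ _ (by rw [hlbs]; exact hj')]
          exact (PySem.List.mem_sorted b (fun x => x) false _).mp (List.getElem_mem _)
        obtain ⟨t, ht, htv⟩ := List.mem_iff_getElem.mp hmemb
        have ht' : t < a.length := by rw [← hlb]; exact ht
        have htv' : b.getD t 0 = (PySem.List.sorted b (fun x => x) false).getD j 0 := by
          rw [List.getD_eq_getElem _ _ ht]; exact htv
        refine ⟨j, t, hj', ht', hjv', htv', ?_⟩
        rw [hpdef, List.getD_eq_getElem _ _ (by simpa using hk), List.getElem_map]
        have hak : a[k] = a.getD k 0 := (List.getD_eq_getElem _ _ hk).symm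
        rw [hak, ← hjv', rank_getD _ hasnd j (by rw [hlas]; exact hj'),
          PySem.List.pyGetD_natCast, ← htv', rank_getD _ hbnd t (by rw [hlb]; exact ht')]
      have hran : ∀ k, k < a.length → 0 ≤ p.getD k 0 ∧ p.getD k 0 < (a.length : Int) := by
        intro k hk
        obtain ⟨j, t, hj, ht, _, _, hv⟩ := hpval k hk
        rw [hv]
        constructor
        · positivity
        · exact_mod_cast ht
      have hinj2 : ∀ k, k < a.length → ∀ k', k' < a.length →
          p.getD k 0 = p.getD k' 0 → k = k' := by
        intro k hk k' hk' he
        obtain ⟨j, t, hj, ht, hjv, htv, hv⟩ := hpval k hk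
        obtain ⟨j', t', hj', ht', hjv', htv', hv'⟩ := hpval k' hk'
        rw [hv, hv'] at he
        have htt : t = t' := by exact_mod_cast he
        have hbsj : (PySem.List.sorted b (fun x => x) false).getD j 0
            = (PySem.List.sorted b (fun x => x) false).getD j' 0 := by
          rw [← htv, ← htv', htt]
        have hjj : j = j' := nodup_getD_inj _ hbsnd j j'
          (by rw [hlbs]; exact hj) (by rw [hlbs]; exact hj') hbsj
        have hav : a.getD k 0 = a.getD k' 0 := by rw [← hjv, ← hjv', hjj]
        exact nodup_getD_inj a hand k k' hk hk' hav
      have key := AB_cycle_iff p a.length hm0 hplen hran hinj2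
      by_cases hw : solveA_walk p (a.length + 1) 0 0 = ((a.length : Nat) : Int)
      · rw [if_pos hw, if_pos (key.mp hw)]
      · rw [if_neg hw, if_neg (fun hcon => hw (key.mpr hcon))]
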